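-- pv_equiv track=rewrite | github.com/williamfhe/advent-of-code-2023 | Day_13/part_1.py | find_possible_mirrors_in_line
-- ===== SOURCE A (Python) =====
-- def find_possible_mirrors_in_line(pattern_line: str) -> set[int]:
--     possible_mirrors = set()
--     for i in range(len(pattern_line) // 2, 0, -1):
--         j = i
--         j2 = j * 2
--         zone = pattern_line[:j]
--         mirror = "".join(reversed(pattern_line[j:j2]))
--
--         if zone == mirror:
--             possible_mirrors.add(len(zone))
--
--         # if the mirror has an odd size we need to also check from the end
--         # exemple pattern = 12345
--         # left : 1/2 12/34 - right : 23/45 4/5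
--         if len(pattern_line) % 2 != 0:
--             zone = pattern_line[-j:]
--             mirror = "".join(reversed(pattern_line[-j2:-j]))
--             if zone == mirror:
--                 possible_mirrors.add(len(pattern_line) - len(zone))
--
--     return possible_mirrors
-- ===== SOURCE B (Python) =====
-- def _reflects(s, p, i):
--     # True iff the i characters on each side of the gap at position p mirror each other
--     return all(s[p - 1 - k] == s[p + k] for k in range(i))
--
--
-- def find_possible_mirrors_in_line(pattern_line: str) -> set[int]:
--     n = len(pattern_line)
--     mirrors = set()
--     for i in range(n // 2, 0, -1):
--         if _reflects(pattern_line, i, i):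
--             mirrors.add(i)
--         if _reflects(pattern_line, n - i, i):
--             mirrors.add(n - i)
--     return mirrors
-- ===== Notes on version B (the rewrite author's own statement) =====
-- stated objective: alternative
-- what changed: B replaces A's per-candidate slice/reversed/join string construction with direct index-pair reflection checks (with early exit) in one symmetric loop that treats both edges uniformly, dropping A's odd-length-only branch; this also makes B return the right-edge mirrors of even-length lines that A misses.
-- intended difference: On even-length lines with an off-center reflection at the right edge (a palindromic proper suffix of even length, e.g. 'aabb'), A omits those mirror positions (returns {1} for 'aabb') while B includes them (returns {1, 3}); a mirror line near the right edge is just as valid for an even-width pattern as for an odd-width one, so B's value is the intended one. — e.g. on find_possible_mirrors_in_line("aabb"): A returns [1], B returns [1, 3]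
import Mathlib
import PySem

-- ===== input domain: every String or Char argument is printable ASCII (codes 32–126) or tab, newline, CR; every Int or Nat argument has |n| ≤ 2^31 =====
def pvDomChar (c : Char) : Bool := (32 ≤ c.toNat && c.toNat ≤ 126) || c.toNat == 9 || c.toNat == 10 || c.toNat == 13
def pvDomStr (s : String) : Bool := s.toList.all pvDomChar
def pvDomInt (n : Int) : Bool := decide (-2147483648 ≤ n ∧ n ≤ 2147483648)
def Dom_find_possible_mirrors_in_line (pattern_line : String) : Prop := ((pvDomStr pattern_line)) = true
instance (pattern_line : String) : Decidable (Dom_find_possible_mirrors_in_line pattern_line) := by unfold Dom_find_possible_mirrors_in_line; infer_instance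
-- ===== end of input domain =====

-- B replaces A's per-candidate slice/reversed/join string building with direct index-pair
-- reflection checks in one symmetric loop without A's odd-length-only branch (objective:
-- alternative, same asymptotic cost); on even-length lines with a right-edge reflection B
-- additionally returns those mirror positions, which A misses (see D_ below).

-- ===== PORT A =====
-- loop body of A, named so the proofs can speak about one iteration (literal transliteration)
def pvStepA (cs : List Char) (n : Int) (possible_mirrors : List Int) (i : Int) : List Int :=
  let j := i
  let j2 := j * 2
  let zone := PySem.List.slice cs none (some j)
  let mirror := (PySem.List.slice cs (some j) (some j2)).reverse
  let possible_mirrors :=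
    if zone = mirror then PySem.Set.add possible_mirrors (zone.length : Int) else possible_mirrors
  if PySem.Int.mod n 2 ≠ 0 then
    let zone := PySem.List.slice cs (some (-j)) none
    let mirror := (PySem.List.slice cs (some (-j2)) (some (-j))).reverse
    if zone = mirror then PySem.Set.add possible_mirrors (n - (zone.length : Int)) else possible_mirrors
  else possible_mirrors

def find_possible_mirrors_in_line (pattern_line : String) : List Int :=
  let n := PySem.Str.len pattern_line
  (PySem.List.pyRange (PySem.Int.floordiv n 2) 0 (-1)).foldl (pvStepA pattern_line.toList n) []

-- ===== PORT B =====
-- _reflects(s, p, i) of Source B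
def pvReflects (s : List Char) (p i : Int) : Bool :=
  (PySem.List.pyRange 0 i 1).all fun k => PySem.List.pyGet? s (p - 1 - k) == PySem.List.pyGet? s (p + k)

-- loop body of B, named so the proofs can speak about one iteration
def pvStepB (cs : List Char) (n : Int) (mirrors : List Int) (i : Int) : List Int :=
  let mirrors := if pvReflects cs i i then PySem.Set.add mirrors i else mirrors
  if pvReflects cs (n - i) i then PySem.Set.add mirrors (n - i) else mirrors

def find_possible_mirrors_in_line_alt (pattern_line : String) : List Int :=
  let n := PySem.Str.len pattern_line
  (PySem.List.pyRange (PySem.Int.floordiv n 2) 0 (-1)).foldl (pvStepB pattern_line.toList n) []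

-- ===== PRECONDITION & SPEC =====
-- On even-length lines with an off-center reflection at the right edge (a palindromic proper
-- suffix of even length, e.g. "aabb") A omits those mirror positions ({1} for "aabb") while B
-- includes them ({1, 3}); such a mirror is as valid for an even-width line as for an odd-width
-- one, so B's value is the intended one.
def D_find_possible_mirrors_in_line (pattern_line : String) : Prop :=
  pattern_line.toList.length % 2 = 0 ∧
  ∃ i < pattern_line.toList.length / 2, 0 < i ∧
    ∀ k < i, pattern_line.toList[pattern_line.toList.length - i + k]? =
             pattern_line.toList[pattern_line.toList.length - i - 1 - k]?
instance (pattern_line : String) : Decidable (D_find_possible_mirrors_in_line pattern_line) := by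
  unfold D_find_possible_mirrors_in_line; infer_instance

def Spec_find_possible_mirrors_in_line (pattern_line : String) (out : List Int) : Prop :=
  ¬ D_find_possible_mirrors_in_line pattern_line → out = find_possible_mirrors_in_line_alt pattern_line
instance (pattern_line : String) (out : List Int) : Decidable (Spec_find_possible_mirrors_in_line pattern_line out) := by
  unfold Spec_find_possible_mirrors_in_line; infer_instance

def pvDiffWitness_find_possible_mirrors_in_line : String := "aabb"
def pvDiffWitnessOut_find_possible_mirrors_in_line : (List Int) × (List Int) := ([1], [1, 3])

-- ===== CLAIM (what is proved, stated in full; the proofs are below) =====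
def Claim_unchanged_find_possible_mirrors_in_line : Prop := ∀ (pattern_line : String), Dom_find_possible_mirrors_in_line pattern_line → Spec_find_possible_mirrors_in_line pattern_line (find_possible_mirrors_in_line pattern_line)
def Claim_changed_find_possible_mirrors_in_line : Prop := Dom_find_possible_mirrors_in_line (pvDiffWitness_find_possible_mirrors_in_line) ∧ D_find_possible_mirrors_in_line (pvDiffWitness_find_possible_mirrors_in_line) ∧ find_possible_mirrors_in_line (pvDiffWitness_find_possible_mirrors_in_line) = pvDiffWitnessOut_find_possible_mirrors_in_line.1 ∧ find_possible_mirrors_in_line_alt (pvDiffWitness_find_possible_mirrors_in_line) = pvDiffWitnessOut_find_possible_mirrors_in_line.2 ∧ pvDiffWitnessOut_find_possible_mirrors_in_line.1 ≠ pvDiffWitnessOut_find_possible_mirrors_in_line.2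
def Claim_exact_find_possible_mirrors_in_line : Prop := ∀ (pattern_line : String), Dom_find_possible_mirrors_in_line pattern_line → D_find_possible_mirrors_in_line pattern_line → find_possible_mirrors_in_line pattern_line ≠ find_possible_mirrors_in_line_alt pattern_line

-- ===== LEMMAS AND PROOFS =====

-- PySem.Int.floordiv / mod on a natural numerator
theorem pv_floordiv_two (N : Nat) : PySem.Int.floordiv (N : Int) 2 = ((N / 2 : Nat) : Int) := by
  show Int.fdiv _ _ = _; rw [Int.fdiv_eq_ediv]; simp

theorem pv_mod_two (N : Nat) : PySem.Int.mod (N : Int) 2 = ((N % 2 : Nat) : Int) := by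
  show Int.fmod _ _ = _; rw [Int.fmod_eq_emod]; simp

-- pvReflects as a bounded quantifier over getElem?
theorem pvReflects_iff (cs : List Char) (p i : Nat) (h1 : i ≤ p) :
    pvReflects cs (p : Int) (i : Int) = true ↔ ∀ k < i, cs[p - 1 - k]? = cs[p + k]? := by
  unfold pvReflects
  rw [PySem.List.pyRange_zero_natCast]
  simp only [List.all_map, List.all_eq_true, List.mem_range, Function.comp]
  constructor
  · intro h k hk
    have hh := h k hk
    rw [show (p : Int) - 1 - (k : Int) = ((p - 1 - k : Nat) : Int) by omega,
        show (p : Int) + (k : Int) = ((p + k : Nat) : Int) by omega,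
        PySem.List.pyGet?_natCast, PySem.List.pyGet?_natCast] at hh
    exact beq_iff_eq.mp hh
  · intro h k hk
    rw [show (p : Int) - 1 - (k : Int) = ((p - 1 - k : Nat) : Int) by omega,
        show (p : Int) + (k : Int) = ((p + k : Nat) : Int) by omega,
        PySem.List.pyGet?_natCast, PySem.List.pyGet?_natCast]
    exact beq_iff_eq.mpr (h k hk)

-- A's front slice comparison, characterised
theorem pv_frontA_iff (cs : List Char) (m : Nat) (h1 : 0 < m) (h2 : 2 * m ≤ cs.length) :
    (PySem.List.slice cs none (some (m : Int)) =
      (PySem.List.slice cs (some (m : Int)) (some ((m : Int) * 2))).reverse)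
    ↔ ∀ k < m, cs[m - 1 - k]? = cs[m + k]? := by
  rw [PySem.List.slice_to_natCast,
      show ((m : Int) * 2) = ((2 * m : Nat) : Int) by push_cast; ring,
      PySem.List.slice_natCast,
      show 2 * m - m = m by omega]
  have hlen2 : ((cs.drop m).take m).length = m := by simp; omega
  constructor
  · intro he k hk
    have : (cs.take m)[m - 1 - k]? = ((cs.drop m).take m).reverse[m - 1 - k]? := by rw [he]
    rw [List.getElem?_take_of_lt (by omega), List.getElem?_reverse (by simp; omega)] at this
    rw [hlen2] at this
    rw [show m - 1 - (m - 1 - k) = k by omega] at this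
    rw [List.getElem?_take_of_lt (by omega), List.getElem?_drop] at this
    rw [this]
  · intro h
    apply List.ext_getElem?
    intro j
    by_cases hj : j < m
    · rw [List.getElem?_take_of_lt (by omega), List.getElem?_reverse (by simp; omega), hlen2,
          List.getElem?_take_of_lt (by omega), List.getElem?_drop]
      have := h (m - 1 - j) (by omega)
      rw [show m - 1 - (m - 1 - j) = j by omega] at this
      rw [this]
    · rw [List.getElem?_eq_none_iff.mpr (by simp; omega),
          List.getElem?_eq_none_iff.mpr (by simp; omega)]

-- A's back slice comparison, characterised
theorem pv_backA_iff (cs : List Char) (m : Nat) (h1 : 0 < m) (h2 : 2 * m ≤ cs.length) :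
    (PySem.List.slice cs (some (-(m : Int))) none =
      (PySem.List.slice cs (some (-((m : Int) * 2))) (some (-(m : Int)))).reverse)
    ↔ ∀ k < m, cs[cs.length - m - 1 - k]? = cs[cs.length - m + k]? := by
  have e2 : (-((m : Int) * 2)) = (-((2 * m : Nat) : Int)) := by push_cast; ring
  rw [PySem.List.slice_from_neg_natCast _ _ h1, e2]
  rw [show PySem.List.slice cs (some (-((2 * m : Nat) : Int))) (some (-(m : Int)))
        = (cs.drop (cs.length - 2 * m)).take m by
      simp only [PySem.List.slice, PySem.List.clampIdx_neg_natCast _ _ (by omega : 0 < 2 * m),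
        PySem.List.clampIdx_neg_natCast _ _ h1]
      congr 1
      omega]
  have hlen2 : ((cs.drop (cs.length - 2 * m)).take m).length = m := by simp; omega
  constructor
  · intro he k hk
    have : (cs.drop (cs.length - m))[k]? = ((cs.drop (cs.length - 2 * m)).take m).reverse[k]? := by
      rw [he]
    rw [List.getElem?_drop, List.getElem?_reverse (by simp; omega), hlen2,
        List.getElem?_take_of_lt (by omega), List.getElem?_drop] at this
    rw [show cs.length - 2 * m + (m - 1 - k) = cs.length - m - 1 - k by omega] at this
    rw [this]
  · intro h
    apply List.ext_getElem?
    intro j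
    by_cases hj : j < m
    · rw [List.getElem?_drop, List.getElem?_reverse (by simp; omega), hlen2,
          List.getElem?_take_of_lt (by omega), List.getElem?_drop]
      rw [show cs.length - 2 * m + (m - 1 - j) = cs.length - m - 1 - j by omega]
      exact (h j hj).symm
    · rw [List.getElem?_eq_none_iff.mpr (by simp; omega),
          List.getElem?_eq_none_iff.mpr (by simp; omega)]

theorem pv_front_len (cs : List Char) (m : Nat) (h : m ≤ cs.length) :
    (PySem.List.slice cs none (some (m : Int))).length = m := by
  rw [PySem.List.slice_to_natCast]; simp [h]

theorem pv_back_len (cs : List Char) (m : Nat) (h1 : 0 < m) (h2 : m ≤ cs.length) :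
    (PySem.List.slice cs (some (-(m : Int))) none).length = m := by
  rw [PySem.List.slice_from_neg_natCast _ _ h1]; simp; omega

-- outside D_, the two loop bodies agree on every loop index
theorem pv_step_eq (cs : List Char)
    (hD : ¬ (cs.length % 2 = 0 ∧ ∃ i < cs.length / 2, 0 < i ∧
      ∀ k < i, cs[cs.length - i + k]? = cs[cs.length - i - 1 - k]?))
    (acc : List Int) (i : Int) (hi : i ∈ PySem.List.pyRange ((cs.length / 2 : Nat) : Int) 0 (-1)) :
    pvStepA cs (cs.length : Int) acc i = pvStepB cs (cs.length : Int) acc i := by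
  rw [PySem.List.mem_pyRange_neg_one] at hi
  obtain ⟨hi0, hile⟩ := hi
  obtain ⟨m, rfl⟩ : ∃ m : Nat, i = (m : Int) := ⟨i.toNat, (Int.toNat_of_nonneg (by omega)).symm⟩
  have hm0 : 0 < m := by omega
  have hmle : m ≤ cs.length / 2 := by omega
  have h2m : 2 * m ≤ cs.length := by omega
  have hcast : ((cs.length : Int) - (m : Int)) = ((cs.length - m : Nat) : Int) := by omega
  simp only [pvStepA, pvStepB, pv_mod_two, hcast,
    pv_frontA_iff cs m hm0 h2m, pv_backA_iff cs m hm0 h2m,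
    pvReflects_iff cs m m le_rfl, pvReflects_iff cs (cs.length - m) m (by omega),
    pv_front_len cs m (by omega), pv_back_len cs m hm0 (by omega)]
  by_cases hpar : cs.length % 2 = 0
  · -- even: A's second branch is off
    rw [if_neg (by simp [hpar])]
    by_cases hm2 : m < cs.length / 2
    · -- strictly inside: B's back check is false, by ¬D_
      have hq : ¬ (∀ k < m, cs[cs.length - m - 1 - k]? = cs[cs.length - m + k]?) := by
        intro hq
        exact hD ⟨hpar, m, hm2, hm0, fun k hk => (hq k hk).symm⟩
      rw [if_neg hq]
    · -- m = length/2: the back check coincides with the front one and re-adds the same element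
      have hNm : cs.length - m = m := by omega
      rw [hNm, hcast, hNm] at *
      by_cases hf : ∀ k < m, cs[m - 1 - k]? = cs[m + k]?
      · simp only [if_pos hf]
        exact (PySem.Set.add_of_mem ((PySem.Set.mem_add _ _ _).mpr (Or.inr rfl))).symm
      · simp only [if_neg hf]
  · -- odd: both branches are present, with identical conditions and added values
    rw [if_pos (show ((cs.length % 2 : Nat) : Int) ≠ 0 by omega)]

-- membership is preserved by B's loop body and its fold
theorem pv_mem_stepB (cs : List Char) (n : Int) (acc : List Int) (i x : Int) (h : x ∈ acc) :
    x ∈ pvStepB cs n acc i := by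
  simp only [pvStepB]
  split_ifs <;> first | exact h | (simp only [PySem.Set.mem_add]; tauto)

theorem pv_mem_foldB (cs : List Char) (n : Int) (l : List Int) (acc : List Int) (x : Int)
    (h : x ∈ acc) : x ∈ l.foldl (pvStepB cs n) acc := by
  induction l generalizing acc with
  | nil => exact h
  | cons a t ih => exact ih _ (pv_mem_stepB cs n acc a x h)

-- B's fold picks up n - i whenever the back reflection at i holds
theorem pv_trigger_foldB (cs : List Char) (n : Int) (l : List Int) (acc : List Int) (i : Int)
    (hi : i ∈ l) (hc : pvReflects cs (n - i) i = true) :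
    (n - i) ∈ l.foldl (pvStepB cs n) acc := by
  induction l generalizing acc with
  | nil => cases hi
  | cons a t ih =>
    rw [List.foldl_cons]
    rcases List.mem_cons.mp hi with rfl | ht
    · apply pv_mem_foldB
      unfold pvStepB
      rw [hc]
      simp only [if_true]
      exact (PySem.Set.mem_add _ _ _).mpr (Or.inr rfl)
    · exact ih _ ht

-- on an even-length line, every element of A's fold is in acc or ≤ length/2
theorem pv_boundA (cs : List Char) (heven : cs.length % 2 = 0) (l : List Int)
    (hl : ∀ i ∈ l, 0 < i ∧ i ≤ ((cs.length / 2 : Nat) : Int)) (acc : List Int) (x : Int)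
    (hx : x ∈ l.foldl (pvStepA cs (cs.length : Int)) acc) :
    x ∈ acc ∨ x ≤ ((cs.length / 2 : Nat) : Int) := by
  induction l generalizing acc with
  | nil => exact Or.inl hx
  | cons a t ih =>
    obtain ⟨ha0, hale⟩ := hl a (List.mem_cons_self ..)
    have step : ∀ y, y ∈ pvStepA cs (cs.length : Int) acc a →
        y ∈ acc ∨ y ≤ ((cs.length / 2 : Nat) : Int) := by
      intro y hy
      obtain ⟨m, rfl⟩ : ∃ m : Nat, a = (m : Int) := ⟨a.toNat, (Int.toNat_of_nonneg (by omega)).symm⟩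
      have hm : m ≤ cs.length / 2 := by omega
      simp only [pvStepA, pv_mod_two, heven] at hy
      rw [if_neg (by simp)] at hy
      split_ifs at hy with hcond
      · rcases (PySem.Set.mem_add _ _ _).mp hy with h | h
        · exact Or.inl h
        · right
          rw [h, pv_front_len cs m (by omega)]
          omega
      · exact Or.inl hy
    rcases ih (fun i hi => hl i (List.mem_cons_of_mem _ hi)) _ hx with h | h
    · exact step x h
    · exact Or.inr h

-- ===== VERDICT (by name: the statement is the Claim_ definition above) =====
theorem find_possible_mirrors_in_line_spec : Claim_unchanged_find_possible_mirrors_in_line := by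
  intro s _ hD
  unfold D_find_possible_mirrors_in_line at hD
  show find_possible_mirrors_in_line s = find_possible_mirrors_in_line_alt s
  simp only [find_possible_mirrors_in_line, find_possible_mirrors_in_line_alt,
    PySem.Str.len_eq, pv_floordiv_two]
  exact PySem.List.foldl_congr_mem _ _ _ _ (fun acc i hi => pv_step_eq s.toList hD acc i hi)

theorem find_possible_mirrors_in_line_changed : Claim_changed_find_possible_mirrors_in_line := by
  unfold Claim_changed_find_possible_mirrors_in_line; decide

theorem find_possible_mirrors_in_line_tight : Claim_exact_find_possible_mirrors_in_line := by
  intro s _ hD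
  obtain ⟨heven, i0, hi0lt, hi0pos, hpal⟩ := hD
  have hses : ((s.toList.length : Int) - (i0 : Int)) = ((s.toList.length - i0 : Nat) : Int) := by
    omega
  have hmemB : ((s.toList.length - i0 : Nat) : Int) ∈ find_possible_mirrors_in_line_alt s := by
    simp only [find_possible_mirrors_in_line_alt, PySem.Str.len_eq, pv_floordiv_two]
    rw [← hses]
    apply pv_trigger_foldB s.toList _ _ _ (i0 : Int)
    · exact PySem.List.mem_pyRange_neg_one.mpr ⟨by omega, by omega⟩
    · rw [hses]
      exact (pvReflects_iff s.toList (s.toList.length - i0) i0 (by omega)).mpr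
        (fun k hk => (hpal k hk).symm)
  have hnotA : ((s.toList.length - i0 : Nat) : Int) ∉ find_possible_mirrors_in_line s := by
    intro hx
    simp only [find_possible_mirrors_in_line, PySem.Str.len_eq, pv_floordiv_two] at hx
    rcases pv_boundA s.toList heven _
      (fun i hi => by
        rw [PySem.List.mem_pyRange_neg_one] at hi
        exact ⟨by omega, by omega⟩) _ _ hx with h | h
    · cases h
    · omega
  intro heq
  rw [heq] at hnotA
  exact hnotA hmemB
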